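-- pv_equiv track=rewrite | github.com/slacassegbb/azure-a2a-main | remote_agents/azurefoundry_gardening/foundry_agent.py | _select_images_in_range
-- ===== SOURCE A (Python) =====
-- from typing import Optional, Dict, List, Any
--
-- MAX_VISION_IMAGES = 8
--
-- def _select_images_in_range(date_from: str, date_to: str, available_images: List[Dict[str, Any]]) -> List[str]:
--     """Filter images to date range — pick 1 per day (closest to midday) up to MAX_VISION_IMAGES."""
--     candidates = [
--         img['name'] for img in available_images
--         if img['name'][:10] >= date_from and img['name'][:10] <= date_to
--     ]
--     candidates.sort()  # chronological (oldest first)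
--
--     if not candidates:
--         return []
--
--     # Group by date and pick the image closest to midday (12:00) for each day
--     by_day: Dict[str, List[str]] = {}
--     for name in candidates:
--         day = name[:10]  # e.g., "2026-03-18"
--         by_day.setdefault(day, []).append(name)
--
--     selected = []
--     for day in sorted(by_day.keys()):
--         day_images = by_day[day]
--         # Pick image closest to midday by comparing time portion
--         best = min(day_images, key=lambda n: abs(
--             int(n[11:13]) * 60 + int(n[14:16]) - 720  # minutes from midnight, target 720 (noon)
--         ) if len(n) > 16 and n[11:13].isdigit() else 720)
--         selected.append(best)
--
--     # If still too many days, evenly sample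
--     if len(selected) > MAX_VISION_IMAGES:
--         step = len(selected) / MAX_VISION_IMAGES
--         selected = [selected[int(i * step)] for i in range(MAX_VISION_IMAGES)]
--
--     return selected
-- ===== SOURCE B (Python) =====
-- from typing import Dict, List, Any
--
-- MAX_VISION_IMAGES = 8
--
-- def _select_images_in_range(date_from: str, date_to: str, available_images: List[Dict[str, Any]]) -> List[str]:
--     """One streaming pass over the sorted candidates keeping, per day, the running
--     best (distance-to-noon, name); no per-day lists, no per-day min() rescans."""
--     candidates = sorted(
--         img['name'] for img in available_images
--         if date_from <= img['name'][:10] <= date_to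
--     )
--     best: Dict[str, tuple] = {}  # day -> (distance, name); insertion order is chronological
--     for n in candidates:
--         if len(n) > 16 and n[11:13].isdigit():
--             d = abs(int(n[11:13]) * 60 + int(n[14:16]) - 720)
--         else:
--             d = 720
--         day = n[:10]
--         if day not in best or d < best[day][0]:
--             best[day] = (d, n)
--     selected = [t[1] for t in best.values()]
--     k = len(selected)
--     if k > MAX_VISION_IMAGES:
--         selected = [selected[i * k // MAX_VISION_IMAGES] for i in range(MAX_VISION_IMAGES)]
--     return selected
-- ===== Notes on version B (the rewrite author's own statement) =====
-- stated objective: simpler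
-- what changed: A builds per-day lists with setdefault/append, sorts the key list, and rescans each day's list with min(); B makes one streaming pass over the sorted candidates keeping a single running (distance, name) best per day and reads the selection off the dict's values, with the even-subsampling index computed in integer arithmetic instead of floats.
import Mathlib
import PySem

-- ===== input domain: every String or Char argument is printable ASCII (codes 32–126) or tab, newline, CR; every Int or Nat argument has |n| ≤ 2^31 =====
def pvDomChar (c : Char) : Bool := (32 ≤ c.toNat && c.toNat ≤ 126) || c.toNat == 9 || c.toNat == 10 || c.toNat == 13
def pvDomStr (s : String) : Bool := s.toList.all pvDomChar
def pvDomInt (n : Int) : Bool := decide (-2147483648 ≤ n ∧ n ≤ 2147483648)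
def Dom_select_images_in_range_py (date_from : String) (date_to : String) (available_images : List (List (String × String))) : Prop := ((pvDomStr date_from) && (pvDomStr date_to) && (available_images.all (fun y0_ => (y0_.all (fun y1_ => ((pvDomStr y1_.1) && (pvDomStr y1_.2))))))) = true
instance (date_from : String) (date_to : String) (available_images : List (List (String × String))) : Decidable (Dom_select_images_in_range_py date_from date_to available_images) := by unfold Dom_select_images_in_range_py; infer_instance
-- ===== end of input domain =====

-- B replaces A's group-into-lists / sort-the-keys / per-day min() rescan by a single
-- streaming pass over the sorted candidates that keeps one running best per day
-- (objective: simpler — one pass, no per-day lists, no second sort, no min() rescans).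

-- shared subexpressions of both Pythons: img['name'], name[:10], and the
-- minutes-from-noon key with its 720 fallback (identical text in A and in B)
def pvName (img : List (String × String)) : String :=
  ((PySem.Dict.mk img).get? "name").getD ""   -- img['name']; none (KeyError) is excluded by Pre_

def pvDay (n : String) : String := PySem.Str.slice n none (some 10)   -- name[:10]

def pvDist (n : String) : Int :=
  if 16 < PySem.Str.len n ∧ PySem.Str.strIsdigit (PySem.Str.slice n (some 11) (some 13)) = true then
    |(PySem.Int.ofStr? (PySem.Str.slice n (some 11) (some 13))).getD 0 * 60 +
      (PySem.Int.ofStr? (PySem.Str.slice n (some 14) (some 16))).getD 0 - 720|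
    -- int(n[11:13]) cannot fail under the isdigit guard; int(n[14:16]) = none (ValueError) is excluded by Pre_
  else 720

-- candidates: the same filter-and-sort step opens both Pythons
def pvCandidates (date_from : String) (date_to : String) (available_images : List (List (String × String))) : List String :=
  PySem.List.sorted
    ((available_images.filter (fun img =>
        decide (date_from ≤ pvDay (pvName img) ∧ pvDay (pvName img) ≤ date_to))).map pvName)
    (fun x => x)

-- ===== PORT A =====
def select_images_in_range_py (date_from : String) (date_to : String) (available_images : List (List (String × String))) : List String :=
  let candidates := pvCandidates date_from date_to available_images
  if candidates = [] then []
  else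
    -- by_day.setdefault(day, []).append(name)
    let by_day : PySem.Dict String (List String) :=
      candidates.foldl (fun d n => d.modify (pvDay n) [] (fun l => l ++ [n])) PySem.Dict.empty
    -- for day in sorted(by_day.keys()): selected.append(min(by_day[day], key=…))
    let selected :=
      (PySem.List.sorted by_day.keys (fun x => x)).foldl
        (fun acc day => acc ++ [(PySem.List.min? (by_day.getD day []) pvDist).getD ""]) []
    if 8 < selected.length then
      -- int(i * (len(selected) / 8)): the float arithmetic is exact (i*len < 2^53, /8 is a
      -- power of two), so int(i*step) = (i*len)//8 — ported as integer floor division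
      (PySem.List.pyRange 0 8 1).foldl
        (fun acc i =>
          acc ++ [(PySem.List.pyGet? selected (PySem.Int.floordiv (i * (selected.length : Int)) 8)).getD ""]) []
    else selected

-- ===== PORT B =====
def select_images_in_range_py_alt (date_from : String) (date_to : String) (available_images : List (List (String × String))) : List String :=
  let candidates := pvCandidates date_from date_to available_images
  -- one pass: best[day] = (distance, name), replaced only on strictly smaller distance
  let best : PySem.Dict String (Int × String) :=
    candidates.foldl
      (fun b n =>
        let d := pvDist n
        let day := pvDay n
        if b.contains day = false ∨ d < (b.getD day (0, "")).1 then b.insert day (d, n) else b)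
      PySem.Dict.empty
  let selected := best.values.map (fun t => t.2)
  if 8 < selected.length then
    (PySem.List.pyRange 0 8 1).foldl
      (fun acc i =>
        acc ++ [(PySem.List.pyGet? selected (PySem.Int.floordiv (i * (selected.length : Int)) 8)).getD ""]) []
  else selected

-- ===== PRECONDITION & SPEC =====
-- Pre_ excludes exactly the inputs where the Python raises: a KeyError when an image dict has
-- no 'name' key, and a ValueError when a candidate name passes the len>16/hour-isdigit guard
-- but int(name[14:16]) does not parse (B raises identically there).
def Pre_select_images_in_range_py (date_from : String) (date_to : String) (available_images : List (List (String × String))) : Prop :=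
  ∀ img ∈ available_images,
    ((PySem.Dict.mk img).get? "name").isSome = true ∧
    ((date_from.toList ≤ (pvDay (pvName img)).toList ∧ (pvDay (pvName img)).toList ≤ date_to.toList ∧
        16 < PySem.Str.len (pvName img) ∧
        PySem.Str.strIsdigit (PySem.Str.slice (pvName img) (some 11) (some 13)) = true) →
      (PySem.Int.ofStr? (PySem.Str.slice (pvName img) (some 14) (some 16))).isSome = true)
instance (date_from : String) (date_to : String) (available_images : List (List (String × String))) : Decidable (Pre_select_images_in_range_py date_from date_to available_images) := by unfold Pre_select_images_in_range_py; infer_instance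

def pvWitness_select_images_in_range_py : String × String × (List (List (String × String))) :=
  ("2024-01-01", "2024-12-31",
    [[("name", "2024-03-05T10:30:00.jpg")], [("name", "2024-03-05T11:59:00.jpg"), ("cam", "a")]])

def Spec_select_images_in_range_py (date_from : String) (date_to : String) (available_images : List (List (String × String))) (out : List String) : Prop := out = select_images_in_range_py_alt date_from date_to available_images
instance (date_from : String) (date_to : String) (available_images : List (List (String × String))) (out : List String) : Decidable (Spec_select_images_in_range_py date_from date_to available_images out) := by unfold Spec_select_images_in_range_py; infer_instance

-- ===== CLAIM (what is proved, stated in full; the proofs are below) =====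
def Claim_equal_select_images_in_range_py : Prop := ∀ (date_from : String) (date_to : String) (available_images : List (List (String × String))), Dom_select_images_in_range_py date_from date_to available_images → Pre_select_images_in_range_py date_from date_to available_images → Spec_select_images_in_range_py date_from date_to available_images (select_images_in_range_py date_from date_to available_images)

-- ===== LEMMAS AND PROOFS =====

-- proof-side vocabulary ----------------------------------------------------

-- one update step of B's running best
def pvStep (p : Int × String) (n : String) : Int × String :=
  if pvDist n < p.1 then (pvDist n, n) else p

-- the running best over a whole day group
def pvBestOf : List String → Int × String
  | [] => (0, "")
  | h :: t => t.foldl pvStep (pvDist h, h)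

-- the days of cs not yet seen, in first-occurrence order
def pvNewDays (seen : List String) : List String → List String
  | [] => []
  | n :: t => if pvDay n ∈ seen then pvNewDays seen t
              else pvDay n :: pvNewDays (pvDay n :: seen) t

lemma pvNewDays_not_mem_seen {seen : List String} {t : List String} {x : String}
    (h : x ∈ pvNewDays seen t) : x ∉ seen := by
  induction t generalizing seen with
  | nil => simp [pvNewDays] at h
  | cons n t ih =>
    by_cases hm : pvDay n ∈ seen
    · exact ih (by simpa [pvNewDays, hm] using h)
    · simp only [pvNewDays, if_neg hm, List.mem_cons] at h
      rcases h with rfl | h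
      · exact hm
      · exact fun hx => (ih h) (List.mem_cons_of_mem _ hx)

lemma pvNewDays_congr {s s' : List String} (h : ∀ x, x ∈ s ↔ x ∈ s') :
    ∀ t, pvNewDays s t = pvNewDays s' t := by
  intro t
  induction t generalizing s s' with
  | nil => rfl
  | cons n t ih =>
    by_cases hm : pvDay n ∈ s
    · simp [pvNewDays, hm, (h _).mp hm, ih h]
    · have hm' : pvDay n ∉ s' := fun hx => hm ((h _).mpr hx)
      simp only [pvNewDays, if_neg hm, if_neg hm']
      exact congrArg _ (ih (by intro x; simp [h x]))

lemma pvSet_update_eq_append_newDays :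
    ∀ (cs : List String) (seen : List String),
      PySem.Set.update seen (cs.map pvDay) = seen ++ pvNewDays seen cs := by
  intro cs
  induction cs with
  | nil => intro seen; simp [PySem.Set.update, pvNewDays]
  | cons n t ih =>
    intro seen
    by_cases hm : pvDay n ∈ seen
    · have : PySem.Set.add seen (pvDay n) = seen := by
        simp [PySem.Set.add, PySem.Set.contains, hm]
      simp only [List.map_cons, PySem.Set.update, List.foldl_cons, this, pvNewDays, if_pos hm]
      exact ih seen
    · have hadd : PySem.Set.add seen (pvDay n) = seen ++ [pvDay n] := by
        simp [PySem.Set.add, PySem.Set.contains, hm]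
      simp only [List.map_cons, PySem.Set.update, List.foldl_cons, hadd, pvNewDays, if_neg hm]
      have := ih (seen ++ [pvDay n])
      simp only [PySem.Set.update] at this
      rw [this, pvNewDays_congr (s := seen ++ [pvDay n]) (s' := pvDay n :: seen) (by intro x; simp [or_comm]) t]
      simp

lemma pvSet_ofList_sublist {α : Type} [BEq α] [LawfulBEq α] (xs : List α) :
    (PySem.Set.ofList xs).Sublist xs := by
  have gen : ∀ (xs : List α) (s : List α), (xs.foldl PySem.Set.add s).Sublist (s ++ xs) := by
    intro xs
    induction xs with
    | nil => simp
    | cons x t ih =>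
      intro s
      simp only [List.foldl_cons]
      by_cases hm : x ∈ s
      · have : PySem.Set.add s x = s := by simp [PySem.Set.add, PySem.Set.contains, hm]
        rw [this]
        exact (ih s).trans (List.Sublist.append_left (List.sublist_cons_self x t) s)
      · have : PySem.Set.add s x = s ++ [x] := by simp [PySem.Set.add, PySem.Set.contains, hm]
        rw [this]
        simpa using ih (s ++ [x])
  simpa [PySem.Set.ofList_eq_foldl] using gen xs []

-- B's fold, characterised --------------------------------------------------
lemma pvInsert_getD_self {d : PySem.Dict String (Int × String)} {day : String}
    (hnd : d.keys.Nodup) (hc : d.contains day = true) (v0 : Int × String) :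
    d.insert day (d.getD day v0) = d := by
  apply PySem.Dict.ext
  rw [PySem.Dict.items_insert_of_contains d _ hc]
  have : ∀ p ∈ d.items, (if (p.1 == day) = true then (day, d.getD day v0) else p) = p := by
    intro p hp
    by_cases hpd : p.1 = day
    · have h2 : d.get? day = some p.2 := by
        have := PySem.Dict.get?_of_mem_items d (k := p.1) (v := p.2) (by simpa using hp) hnd
        rwa [hpd] at this
      simp only [hpd, beq_self_eq_true, if_pos, PySem.Dict.getD_eq_get?_getD, h2, Option.getD_some]
      exact Prod.ext hpd.symm rfl
    · simp [hpd]
  calc List.map (fun p => if (p.1 == day) = true then (day, d.getD day v0) else p) d.items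
      = List.map id d.items := List.map_congr_left (by simpa using this)
    _ = d.items := List.map_id _

lemma pvB_items :
    ∀ (cs : List String) (d : PySem.Dict String (Int × String)), d.keys.Nodup →
      (cs.foldl
        (fun b n =>
          let dd := pvDist n
          let day := pvDay n
          if b.contains day = false ∨ dd < (b.getD day (0, "")).1 then b.insert day (dd, n) else b)
        d).items
      = d.items.map (fun p => (p.1, (cs.filter (fun m => pvDay m == p.1)).foldl pvStep p.2))
        ++ (pvNewDays d.keys cs).map
            (fun day => (day, pvBestOf (cs.filter (fun m => pvDay m == day)))) := by
  intro cs
  induction cs with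
  | nil => intro d hnd; simp [pvNewDays]
  | cons n t ih =>
    intro d hnd
    simp only [List.foldl_cons]
    by_cases hc : d.contains (pvDay n) = true
    · have hmem : pvDay n ∈ d.keys := (PySem.Dict.contains_iff_mem_keys d _).mp hc
      have hstep :
          (let dd := pvDist n; let day := pvDay n;
            if d.contains day = false ∨ dd < (d.getD day (0, "")).1 then d.insert day (dd, n) else d)
          = d.insert (pvDay n) (pvStep (d.getD (pvDay n) (0, "")) n) := by
        by_cases hlt : pvDist n < (d.getD (pvDay n) (0, "")).1
        · simp [pvStep, hlt, hc]
        · simp only [pvStep, if_neg hlt, hc, Bool.true_eq_false, false_or]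
          exact (pvInsert_getD_self hnd hc _).symm
      rw [hstep]
      rw [ih _ (PySem.Dict.nodup_keys_insert _ _ _ hnd)]
      rw [PySem.Dict.items_insert_of_contains d _ hc, PySem.Dict.keys_insert_of_contains d _ hc]
      rw [List.map_map]
      have hND : pvNewDays d.keys (n :: t) = pvNewDays d.keys t := by
        simp [pvNewDays, hmem]
      rw [hND]
      congr 1
      · apply List.map_congr_left
        intro p hp
        by_cases hpd : p.1 = pvDay n
        · have hp2 : p.2 = d.getD (pvDay n) (0, "") := by
            have := PySem.Dict.get?_of_mem_items d (k := p.1) (v := p.2) (by simpa using hp) hnd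
            rw [hpd] at this
            simp [PySem.Dict.getD_eq_get?_getD, this]
          simp only [Function.comp_apply, hpd, beq_self_eq_true, if_pos, List.filter_cons]
          simp only [List.foldl_cons]
          rw [hp2]
        · have hne : (pvDay n == p.1) = false := by simp [Ne.symm hpd]
          simp only [Function.comp_apply, List.filter_cons, hne]
          simp [hpd]
      · apply List.map_congr_left
        intro day' hday'
        have : day' ≠ pvDay n := fun h => (pvNewDays_not_mem_seen hday') (h ▸ hmem)
        have hne : (pvDay n == day') = false := by simp [Ne.symm this]
        simp [hne]
    · have hcf : d.contains (pvDay n) = false := by simpa using hc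
      have hnmem : pvDay n ∉ d.keys := fun h => by
        rw [(PySem.Dict.contains_iff_mem_keys d _).mpr h] at hcf; exact absurd hcf (by simp)
      have hstep :
          (let dd := pvDist n; let day := pvDay n;
            if d.contains day = false ∨ dd < (d.getD day (0, "")).1 then d.insert day (dd, n) else d)
          = d.insert (pvDay n) (pvDist n, n) := by
        simp [hcf]
      rw [hstep]
      have hnd' : (d.insert (pvDay n) (pvDist n, n)).keys.Nodup :=
        PySem.Dict.nodup_keys_insert _ _ _ hnd
      rw [ih _ hnd']
      rw [PySem.Dict.items_insert_of_not_contains d _ hcf, PySem.Dict.keys_insert_of_not_contains d _ hcf]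
      have hND : pvNewDays d.keys (n :: t) = pvDay n :: pvNewDays (pvDay n :: d.keys) t := by
        simp [pvNewDays, hnmem]
      rw [hND]
      rw [List.map_append, List.append_assoc]
      congr 1
      · apply List.map_congr_left
        intro p hp
        have hpk : p.1 ∈ d.keys := PySem.Dict.mem_keys_of_mem_items d hp
        have hpd : p.1 ≠ pvDay n := fun h => hnmem (h ▸ hpk)
        have hne : (pvDay n == p.1) = false := by simp [Ne.symm hpd]
        simp [hne]
      · simp only [List.map_cons, List.map_nil, List.singleton_append, List.map_cons]
        congr 1
        · simp [pvBestOf]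
        · rw [pvNewDays_congr (s := d.keys ++ [pvDay n]) (s' := pvDay n :: d.keys) (by intro x; simp [or_comm]) t]
          apply List.map_congr_left
          intro day' hday'
          have : day' ≠ pvDay n := fun h => (pvNewDays_not_mem_seen hday') (h ▸ List.mem_cons_self)
          have hne : (pvDay n == day') = false := by simp [Ne.symm this]
          simp [hne]

-- A's per-day min() is the running best -----------------------------------
lemma pvMinCons : ∀ (t : List String) (m : String),
    PySem.List.min? (m :: t) pvDist
      = some (t.foldl (fun b n => if pvDist n < pvDist b then n else b) m) := by
  intro t
  induction t with
  | nil => intro m; rfl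
  | cons x t ih =>
    intro m
    by_cases hc : pvDist x < pvDist m
    · have h1 : PySem.List.min? (m :: x :: t) pvDist = PySem.List.min? (x :: t) pvDist := by
        simp [PySem.List.min?, hc]
      rw [h1, ih]
      simp [hc]
    · have h1 : PySem.List.min? (m :: x :: t) pvDist = PySem.List.min? (m :: t) pvDist := by
        simp [PySem.List.min?, hc]
      rw [h1, ih]
      simp [hc]

lemma pvPairFold (t : List String) : ∀ (h : String),
    t.foldl pvStep (pvDist h, h)
      = (pvDist (t.foldl (fun b n => if pvDist n < pvDist b then n else b) h),
         t.foldl (fun b n => if pvDist n < pvDist b then n else b) h) := by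
  induction t with
  | nil => intro h; rfl
  | cons x t ih =>
    intro h
    simp only [List.foldl_cons, pvStep]
    by_cases hc : pvDist x < pvDist h
    · simp [hc, ih]
    · simp [hc, ih]

lemma pvMin_eq_bestOf (g : List String) (hg : g ≠ []) :
    (PySem.List.min? g pvDist).getD "" = (pvBestOf g).2 := by
  obtain ⟨h, t, rfl⟩ := List.exists_cons_of_ne_nil hg
  rw [pvMinCons]
  simp [pvBestOf, pvPairFold]

-- days of a sorted candidate list are sorted -------------------------------
lemma pvTake_lt (k : Nat) : ∀ (l l' : List Char), l < l' → l.take k < l'.take k ∨ l.take k = l'.take k := by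
  induction k with
  | zero => intro l l' _; right; simp
  | succ k ih =>
    intro l l' hlt
    match l, l' with
    | [], [] => exact absurd hlt (List.not_lt_nil _)
    | [], c :: t => left; simp [List.nil_lt_cons]
    | c :: t, [] => exact absurd hlt (List.not_lt_nil _)
    | c :: t, d :: t' =>
      rcases List.cons_lt_cons_iff.mp hlt with h | ⟨rfl, h⟩
      · left; simp only [List.take_succ_cons]; exact List.cons_lt_cons_iff.mpr (Or.inl h)
      · rcases ih t t' h with h2 | h2
        · left; simp only [List.take_succ_cons]; exact List.cons_lt_cons_iff.mpr (Or.inr ⟨rfl, h2⟩)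
        · right; simp [List.take_succ_cons, h2]

lemma pvDay_mono {s t : String} (h : s ≤ t) : pvDay s ≤ pvDay t := by
  rcases lt_or_eq_of_le h with hlt | rfl
  · have hl : s.toList < t.toList := String.lt_iff_toList_lt.mp hlt
    have := pvTake_lt 10 s.toList t.toList hl
    have hsl : (pvDay s).toList = s.toList.take 10 := by
      simp [pvDay, pysem, PySem.List.slice_to (b := (10:Int)) s.toList (by norm_num)]
    have htl : (pvDay t).toList = t.toList.take 10 := by
      simp [pvDay, pysem, PySem.List.slice_to (b := (10:Int)) t.toList (by norm_num)]
    rcases this with h2 | h2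
    · exact le_of_lt (String.lt_iff_toList_lt.mpr (by rw [hsl, htl]; exact h2))
    · exact le_of_eq (by
        have : (pvDay s).toList = (pvDay t).toList := by rw [hsl, htl, h2]
        exact String.toList_injective this)
  · exact le_rfl

-- main assembly ------------------------------------------------------------
lemma pvDays_eq (cs : List String) :
    pvNewDays [] cs = PySem.Set.ofList (cs.map pvDay) := by
  have h := pvSet_update_eq_append_newDays cs []
  rw [PySem.Set.ofList_eq_foldl]
  simpa [PySem.Set.update] using h.symm

lemma pvDays_pairwise_lt (xs : List String) :
    (pvNewDays [] (PySem.List.sorted xs (fun x => x))).Pairwise (· < ·) := by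
  rw [pvDays_eq]
  have h1 : (PySem.List.sorted xs (fun x => x)).Pairwise (· ≤ ·) :=
    PySem.List.sorted_pairwise xs (fun x => x)
  have h2 : ((PySem.List.sorted xs (fun x => x)).map pvDay).Pairwise (· ≤ ·) :=
    List.Pairwise.map pvDay (fun _ _ h => pvDay_mono h) h1
  have h3 := List.Pairwise.sublist (pvSet_ofList_sublist ((PySem.List.sorted xs (fun x => x)).map pvDay)) h2
  have h4 : (PySem.Set.ofList ((PySem.List.sorted xs (fun x => x)).map pvDay)).Nodup :=
    PySem.Set.nodup_ofList _
  exact (h3.and h4).imp (fun ⟨a, b⟩ => lt_of_le_of_ne a b)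

theorem pv_main (date_from date_to : String) (available_images : List (List (String × String))) :
    select_images_in_range_py date_from date_to available_images
      = select_images_in_range_py_alt date_from date_to available_images := by
  by_cases hnil : pvCandidates date_from date_to available_images = []
  · simp [select_images_in_range_py, select_images_in_range_py_alt, hnil, PySem.Dict.values, PySem.Dict.empty]
  · simp only [select_images_in_range_py, select_images_in_range_py_alt, if_neg hnil]
    set cs := pvCandidates date_from date_to available_images with hcsdef
    -- A's by_day dictionary
    set byd : PySem.Dict String (List String) :=
      cs.foldl (fun d n => d.modify (pvDay n) [] (fun l => l ++ [n])) PySem.Dict.empty with hbyd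
    have hkeys : byd.keys = pvNewDays [] cs := by
      rw [hbyd, PySem.Dict.keys_foldl_modify_key cs pvDay [] (fun _ n l => l ++ [n]) PySem.Dict.empty,
        PySem.Dict.keys_empty]
      simpa using pvSet_update_eq_append_newDays cs []
    have hgetD : ∀ day, byd.getD day [] = cs.filter (fun m => pvDay m == day) := by
      intro day
      have hmap : byd = (cs.map (fun n => (pvDay n, n))).foldl
          (fun d p => d.modify p.1 [] (fun l => l ++ [p.2])) PySem.Dict.empty := by
        rw [hbyd, List.foldl_map]
      rw [hmap, PySem.Dict.getD_foldl_modify_append, PySem.Dict.getD_empty]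
      simp [List.filter_map, Function.comp_def]
    -- days of a sorted candidate list are already sorted and distinct
    have hpw : (pvNewDays [] cs).Pairwise (· < ·) := by
      rw [hcsdef]; exact pvDays_pairwise_lt _
    have hsorted : PySem.List.sorted (pvNewDays [] cs) (fun x => x) = pvNewDays [] cs :=
      PySem.List.sorted_eq_of_perm_of_pairwise_lt _ _ _ (List.Perm.refl _) hpw
    -- per-day: A's min() is the running best
    have hfin : ∀ day ∈ pvNewDays [] cs,
        (PySem.List.min? (byd.getD day []) pvDist).getD ""
          = (pvBestOf (cs.filter (fun m => pvDay m == day))).2 := by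
      intro day hday
      rw [hgetD]
      apply pvMin_eq_bestOf
      have hm : day ∈ cs.map pvDay := by
        rw [pvDays_eq] at hday
        exact (PySem.Set.mem_ofList _ _).mp hday
      obtain ⟨n, hn, rfl⟩ := List.mem_map.mp hm
      intro hfil
      have : n ∈ cs.filter (fun m => (pvDay m == pvDay n)) := List.mem_filter.mpr ⟨hn, by simp⟩
      simp [hfil] at this
    -- B's dictionary of running bests
    have hB := pvB_items cs PySem.Dict.empty PySem.Dict.nodup_keys_empty
    rw [PySem.Dict.keys_empty] at hB
    have hBitems : (cs.foldl
        (fun b n =>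
          let d := pvDist n
          let day := pvDay n
          if b.contains day = false ∨ d < (b.getD day (0, "")).1 then b.insert day (d, n) else b)
        PySem.Dict.empty).items
        = (pvNewDays [] cs).map (fun day => (day, pvBestOf (cs.filter (fun m => pvDay m == day)))) := by
      rw [hB]; rfl
    -- both selected lists coincide
    have hsel :
        (PySem.List.sorted byd.keys (fun x => x)).foldl
          (fun acc day => acc ++ [(PySem.List.min? (byd.getD day []) pvDist).getD ""]) []
        = ((cs.foldl
            (fun b n =>
              let d := pvDist n
              let day := pvDay n
              if b.contains day = false ∨ d < (b.getD day (0, "")).1 then b.insert day (d, n) else b)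
            PySem.Dict.empty).values).map (fun t => t.2) := by
      rw [PySem.List.foldl_append_singleton_eq_map, List.nil_append, hkeys, hsorted]
      have hvals : (cs.foldl
          (fun b n =>
            let d := pvDist n
            let day := pvDay n
            if b.contains day = false ∨ d < (b.getD day (0, "")).1 then b.insert day (d, n) else b)
          PySem.Dict.empty).values
          = (pvNewDays [] cs).map (fun day => pvBestOf (cs.filter (fun m => pvDay m == day))) := by
        show ((cs.foldl _ PySem.Dict.empty).items.map (fun p => p.2)) = _
        rw [hBitems, List.map_map]
        rfl
      rw [hvals, List.map_map]
      exact List.map_congr_left hfin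
    rw [hsel]

-- ===== VERDICT (by name: the statement is the Claim_ definition above) =====
theorem select_images_in_range_py_spec : Claim_equal_select_images_in_range_py := by
  intro date_from date_to available_images _ _
  unfold Spec_select_images_in_range_py
  exact pv_main date_from date_to available_images
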